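-- pv_equiv track=rewrite | github.com/cecilpert/old_CSTB | scripts/allgenomes.py | treat_mismatch_forward
-- ===== SOURCE A (Python) =====
-- def treat_mismatch_forward(PAM,mm):
--     '''
--     Check if a mismatch is in the PAM motif. For forward verification, check if the mismatch is in the first bases (depending on motif length).
--     '''
--     acgt=['A','C','G','T']
--     for base in acgt:
--         mm_pam=mm.split(base)[0]
--         if mm_pam.isnumeric():
--             if int(mm_pam)<len(PAM):
--                 return True
--     return False
-- ===== SOURCE B (Python) =====
-- def treat_mismatch_forward(PAM, mm):
--     '''
--     Check if a mismatch is in the PAM motif: single left-to-right scan for the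
--     first A/C/G/T character; the numeric prefix (if any) must come before it.
--     '''
--     idx = next((i for i, c in enumerate(mm) if c in 'ACGT'), len(mm))
--     prefix = mm[:idx]
--     return prefix.isnumeric() and int(prefix) < len(PAM)
-- ===== Notes on version B (the rewrite author's own statement) =====
-- stated objective: simpler
-- what changed: Replaces the loop over the four bases with four split passes by a single left-to-right scan that finds the first A/C/G/T character and tests the prefix before it once.
import Mathlib
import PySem

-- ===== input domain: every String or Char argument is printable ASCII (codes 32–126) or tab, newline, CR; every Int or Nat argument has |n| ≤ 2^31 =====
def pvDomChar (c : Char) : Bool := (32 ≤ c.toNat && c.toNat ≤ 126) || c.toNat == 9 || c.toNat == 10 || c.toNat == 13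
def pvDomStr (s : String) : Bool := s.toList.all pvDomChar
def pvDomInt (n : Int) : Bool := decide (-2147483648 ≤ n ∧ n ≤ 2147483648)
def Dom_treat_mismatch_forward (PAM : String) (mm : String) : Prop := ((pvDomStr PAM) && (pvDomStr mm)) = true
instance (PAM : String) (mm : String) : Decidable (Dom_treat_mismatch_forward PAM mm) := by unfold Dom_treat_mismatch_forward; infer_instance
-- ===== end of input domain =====

-- B replaces A's four split-by-base passes by one left-to-right scan for the first A/C/G/T
-- character, testing the prefix before it once (objective: simpler).


-- ===== PORT A =====
-- the 'for base in acgt' loop; mm.split(base)[0] via split?/pyGet? (split with a nonempty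
-- separator always returns a nonempty list, so the getDs never fire); isnumeric ported as
-- strIsdigit (exact on the printable-ASCII domain); int() via ofStr? (some under strIsdigit).
def tmfA_loop (PAM : String) (mm : String) : List String → Bool
  | [] => false
  | base :: rest =>
    let parts := (PySem.Str.split? mm base).getD []
    let mm_pam := (PySem.List.pyGet? parts 0).getD ""
    if PySem.Str.strIsdigit mm_pam then
      if (PySem.Int.ofStr? mm_pam).getD 0 < PySem.Str.len PAM then true
      else tmfA_loop PAM mm rest
    else tmfA_loop PAM mm rest

def treat_mismatch_forward (PAM : String) (mm : String) : Bool :=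
  tmfA_loop PAM mm ["A", "C", "G", "T"]

-- ===== PORT B =====
-- prefix of mm before its first A/C/G/T character (mm[:idx]); isnumeric as strIsdigit
-- (exact on the printable-ASCII domain); int() via ofChars? (some under strIsdigit).
def treat_mismatch_forward_alt (PAM : String) (mm : String) : Bool :=
  let pfx := mm.toList.takeWhile (fun c => !(['A', 'C', 'G', 'T'].contains c))
  PySem.Chars.strIsdigit pfx && decide ((PySem.Int.ofChars? pfx).getD 0 < PySem.Str.len PAM)

-- ===== PRECONDITION & SPEC =====
def Spec_treat_mismatch_forward (PAM : String) (mm : String) (out : Bool) : Prop := out = treat_mismatch_forward_alt PAM mm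
instance (PAM : String) (mm : String) (out : Bool) : Decidable (Spec_treat_mismatch_forward PAM mm out) := by unfold Spec_treat_mismatch_forward; infer_instance

-- ===== CLAIM (what is proved, stated in full; the proofs are below) =====
def Claim_equal_treat_mismatch_forward : Prop := ∀ (PAM : String) (mm : String), Dom_treat_mismatch_forward PAM mm → Spec_treat_mismatch_forward PAM mm (treat_mismatch_forward PAM mm)

-- ===== LEMMAS AND PROOFS =====

-- splitOn.go with a nonempty accumulator just prepends it (reversed).
theorem tmf_go_acc (sep : List Char) (fuel : Nat) :
    ∀ (l cur : List Char) (acc : List (List Char)),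
      PySem.Chars.splitOn.go sep fuel l cur acc
        = acc.reverse ++ PySem.Chars.splitOn.go sep fuel l cur [] := by
  induction fuel with
  | zero =>
    intro l cur acc
    simp [PySem.Chars.splitOn.go]
  | succ fuel ih =>
    intro l cur acc
    cases l with
    | nil => simp [PySem.Chars.splitOn.go]
    | cons c rest =>
      simp only [PySem.Chars.splitOn.go]
      split
      · rw [ih _ _ (cur.reverse :: acc), ih _ _ [cur.reverse]]
        simp
      · exact ih _ _ acc

-- head of splitOn.go on a single-char separator = chars before the first occurrence.
theorem tmf_go_head (b : Char) (fuel : Nat) :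
    ∀ (l cur : List Char), l.length ≤ fuel →
      (PySem.Chars.splitOn.go [b] fuel l cur []).headD []
        = cur.reverse ++ l.takeWhile (· ≠ b) := by
  induction fuel with
  | zero =>
    intro l cur h
    have : l = [] := List.eq_nil_of_length_eq_zero (Nat.le_zero.mp h)
    subst this
    simp [PySem.Chars.splitOn.go]
  | succ fuel ih =>
    intro l cur h
    cases l with
    | nil => simp [PySem.Chars.splitOn.go]
    | cons c rest =>
      simp only [PySem.Chars.splitOn.go]
      by_cases hcb : c = b
      · have hpre : [b].isPrefixOf (c :: rest) = true := by
          simp [List.isPrefixOf, hcb]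
        rw [if_pos hpre, tmf_go_acc]
        simp [hcb]
      · have hpre : [b].isPrefixOf (c :: rest) = false := by
          simp [List.isPrefixOf]
          exact fun hh => (hcb hh.symm).elim
        rw [if_neg (by simp [hpre])]
        rw [ih rest (c :: cur) (by simpa using Nat.le_of_succ_le_succ h)]
        simp [hcb]

theorem tmf_head_splitOn (cs : List Char) (b : Char) :
    (PySem.Chars.splitOn cs [b]).headD [] = cs.takeWhile (· ≠ b) := by
  unfold PySem.Chars.splitOn
  exact tmf_go_head b (cs.length + 1) cs [] (by omega)

-- a decimal digit is not one of the four bases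
theorem tmf_digit_not_base (c : Char) (h : PySem.Chars.isdigit c = true) :
    (['A', 'C', 'G', 'T'].contains c) = false := by
  simp only [PySem.Chars.isdigit, Bool.and_eq_true, decide_eq_true_eq] at h
  by_contra hcon
  rw [Bool.not_eq_false, List.contains_eq_mem, decide_eq_true_eq] at hcon
  fin_cases hcon <;> exact absurd h.2 (by decide)

theorem tmf_contains_of_mem {c : Char} (h : c ∈ (['A', 'C', 'G', 'T'] : List Char)) :
    (['A', 'C', 'G', 'T'].contains c) = true := by
  rw [List.contains_eq_mem]
  exact decide_eq_true h

-- if the prefix before the first b is all digits, it IS the prefix before the first base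
theorem tmf_L1 (b : Char) (hb : b ∈ (['A', 'C', 'G', 'T'] : List Char)) :
    ∀ (cs : List Char), (cs.takeWhile (· ≠ b)).all PySem.Chars.isdigit = true →
      cs.takeWhile (· ≠ b) = cs.takeWhile (fun c => !(['A', 'C', 'G', 'T'].contains c)) := by
  intro cs
  induction cs with
  | nil => simp
  | cons c rest ih =>
    intro hall
    by_cases hcb : c = b
    · subst hcb
      rw [List.takeWhile_cons, List.takeWhile_cons, if_neg (by simp),
        if_neg (by rw [tmf_contains_of_mem hb]; simp)]
    · rw [List.takeWhile_cons, if_pos (by simp [hcb])] at hall ⊢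
      rw [List.all_cons, Bool.and_eq_true] at hall
      have hnb := tmf_digit_not_base c hall.1
      rw [List.takeWhile_cons, if_pos (by rw [hnb]; rfl)]
      rw [ih hall.2]

-- if the prefix before the first base is all digits, some base realises it as its takeWhile
theorem tmf_L2 :
    ∀ (cs : List Char),
      (cs.takeWhile (fun c => !(['A', 'C', 'G', 'T'].contains c))).all PySem.Chars.isdigit = true →
      ∃ b ∈ (['A', 'C', 'G', 'T'] : List Char),
        cs.takeWhile (· ≠ b) = cs.takeWhile (fun c => !(['A', 'C', 'G', 'T'].contains c)) := by
  intro cs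
  induction cs with
  | nil => exact fun _ => ⟨'A', by simp⟩
  | cons c rest ih =>
    intro hall
    by_cases hc : (['A', 'C', 'G', 'T'].contains c) = true
    · refine ⟨c, by rw [List.contains_eq_mem, decide_eq_true_eq] at hc; exact hc, ?_⟩
      rw [List.takeWhile_cons, List.takeWhile_cons, if_neg (by simp),
        if_neg (by rw [hc]; simp)]
    · rw [Bool.not_eq_true] at hc
      rw [List.takeWhile_cons, if_pos (by rw [hc]; rfl)] at hall
      rw [List.all_cons, Bool.and_eq_true] at hall
      obtain ⟨b, hb, heq⟩ := ih hall.2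
      refine ⟨b, hb, ?_⟩
      have hcb : c ≠ b := by
        intro hh
        subst hh
        rw [tmf_contains_of_mem hb] at hc
        exact Bool.true_eq_false.mp hc
      rw [List.takeWhile_cons, if_pos (by simp [hcb]),
        List.takeWhile_cons, if_pos (by rw [hc]; rfl), heq]

-- the per-base test of A's loop, on the char level
def tmfQ (PAM : String) (p : List Char) : Bool :=
  PySem.Chars.strIsdigit p && decide ((PySem.Int.ofChars? p).getD 0 < PySem.Str.len PAM)

-- A's loop body for one single-char base reduces to tmfQ of the takeWhile prefix
theorem tmf_branch (PAM mm : String) (base : String) (b : Char) (hb : base.toList = [b])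
    (rest : List String) :
    tmfA_loop PAM mm (base :: rest)
      = (tmfQ PAM (mm.toList.takeWhile (· ≠ b)) || tmfA_loop PAM mm rest) := by
  have hsplit : PySem.Str.split? mm base
      = some ((PySem.Chars.splitOn mm.toList [b]).map String.ofList) := by
    simp [PySem.Str.split?, PySem.Chars.split?, hb]
  have hne : PySem.Chars.splitOn mm.toList [b] ≠ [] := by
    intro hnil
    have hhd := tmf_head_splitOn mm.toList b
    rw [hnil] at hhd
    cases hmm : mm.toList with
    | nil =>
      unfold PySem.Chars.splitOn PySem.Chars.splitOn.go at hnil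
      simp [hmm] at hnil
    | cons c cs =>
      rw [hmm] at hhd
      by_cases hcb : c = b
      · subst hcb
        unfold PySem.Chars.splitOn at hnil
        rw [hmm] at hnil
        simp only [PySem.Chars.splitOn.go] at hnil
        rw [if_pos (by simp [List.isPrefixOf])] at hnil
        rw [tmf_go_acc] at hnil
        simp at hnil
      · simp [hcb] at hhd
  obtain ⟨p0, ps, hps⟩ := List.exists_cons_of_ne_nil hne
  have hp0 : p0 = mm.toList.takeWhile (· ≠ b) := by
    have hhd := tmf_head_splitOn mm.toList b
    rw [hps] at hhd
    simpa using hhd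
  have hget : (PySem.List.pyGet?
      ((PySem.Chars.splitOn mm.toList [b]).map String.ofList) 0).getD "" = String.ofList p0 := by
    rw [hps]
    simp [PySem.List.pyGet?, PySem.List.pyIdx?]
  have hdig : PySem.Str.strIsdigit (String.ofList p0) = PySem.Chars.strIsdigit p0 := by
    simp [PySem.Str.strIsdigit]
  have hint : PySem.Int.ofStr? (String.ofList p0) = PySem.Int.ofChars? p0 := by
    simp [PySem.Int.ofStr?]
  simp only [tmfA_loop, hsplit, Option.getD_some, hget, hdig, hint]
  simp only [tmfQ, ← hp0]
  by_cases h1 : PySem.Chars.strIsdigit p0 = true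
  · by_cases h2 : (PySem.Int.ofChars? p0).getD 0 < PySem.Str.len PAM
    · rw [if_pos h1, if_pos h2, h1, Bool.true_and, decide_eq_true h2, Bool.true_or]
    · rw [if_pos h1, if_neg h2, h1, Bool.true_and, decide_eq_false h2, Bool.false_or]
  · rw [if_neg h1]
    simp [Bool.eq_false_iff.mpr h1]

-- ===== VERDICT (by name: the statement is the Claim_ definition above) =====
theorem treat_mismatch_forward_spec : Claim_equal_treat_mismatch_forward := by
  intro PAM mm _
  unfold Spec_treat_mismatch_forward treat_mismatch_forward treat_mismatch_forward_alt
  rw [tmf_branch PAM mm "A" 'A' rfl, tmf_branch PAM mm "C" 'C' rfl,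
      tmf_branch PAM mm "G" 'G' rfl, tmf_branch PAM mm "T" 'T' rfl]
  simp only [tmfA_loop, Bool.or_false]
  set pfx := mm.toList.takeWhile (fun c => !(['A', 'C', 'G', 'T'].contains c)) with hpfx
  by_cases hB : (PySem.Chars.strIsdigit pfx
      && decide ((PySem.Int.ofChars? pfx).getD 0 < PySem.Str.len PAM)) = true
  · -- B is true: some base realises pfx, so A's or-chain is true
    have hdig : PySem.Chars.strIsdigit pfx = true := by
      have hB' := hB
      rw [Bool.and_eq_true] at hB'
      exact hB'.1
    have hall : pfx.all PySem.Chars.isdigit = true := by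
      unfold PySem.Chars.strIsdigit at hdig
      rw [Bool.and_eq_true] at hdig
      exact hdig.2
    obtain ⟨b, hb, heq⟩ := tmf_L2 mm.toList (hpfx ▸ hall)
    have hQ : tmfQ PAM (mm.toList.takeWhile (· ≠ b)) = true := by
      unfold tmfQ
      rw [heq, ← hpfx]
      exact hB
    rw [hB]
    fin_cases hb <;> simp_all
  · -- B is false: each base's test is false (a digit prefix would equal pfx)
    have hq : ∀ b ∈ (['A', 'C', 'G', 'T'] : List Char),
        tmfQ PAM (mm.toList.takeWhile (· ≠ b)) = false := by
      intro b hb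
      cases hd : PySem.Chars.strIsdigit (mm.toList.takeWhile (· ≠ b)) with
      | false => unfold tmfQ; rw [hd, Bool.false_and]
      | true =>
        have hall : (mm.toList.takeWhile (· ≠ b)).all PySem.Chars.isdigit = true := by
          unfold PySem.Chars.strIsdigit at hd
          rw [Bool.and_eq_true] at hd
          exact hd.2
        have heq := tmf_L1 b hb mm.toList hall
        unfold tmfQ
        rw [heq, ← hpfx]
        exact Bool.eq_false_iff.mpr hB
    rw [Bool.eq_false_iff.mpr hB]
    rw [hq 'A' (by simp), hq 'C' (by simp), hq 'G' (by simp), hq 'T' (by simp)]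
    rfl
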